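-- pv_equiv track=rewrite | github.com/KG-CFD/UQ-work | a1.py | get_intermediate_locations
-- ===== SOURCE A (Python) =====
-- def get_intermediate_locations(position: tuple[int, int], new_position: tuple[int, int]) -> list[tuple[int, int]]:
--     """ generates intermediate positions between 2 chosen positions,either vertical,horizontal or diagonal """
--     intermediates = []
--
--
--     # Check if both  positions are in same column(Vertical)
--     if position[1] == new_position[1]:
--         step = 1 if new_position[0] > position[0] else -1
--         for x in range(position[0] + step, new_position[0], step):
--             intermediates.append((x, position[1]))
--         return intermediates
--
--     # Check if positions are in same row (Horizontal)
--     if position[0] == new_position[0]: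
--         step = 1 if new_position[1] > position[1] else -1
--         for y in range(position[1] + step, new_position[1], step):
--             intermediates.append((position[0], y))
--         return intermediates
--
--     # Need to now check diagonals
--     # Method used creates all diagonals of smallest submatrix that has both position and new_position inside
--     # and then checks if both new_position and position are within any diagonals.
--     min_row = min(position[0], new_position[0])
--     max_row = max(position[0], new_position[0])
--     min_col = min(position[1], new_position[1])
--     max_col = max(position[1], new_position[1])
--
--     diagonals = []
--
--     # Main diagonals (top-left to bottom-right)
--     # Diagonals starting from  bottom left edge
--     for d in range(max_col - min_col + 1):
--         diagonal = []
--         i = min_row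
--         j = min_col + d
--         while i <= max_row and j <= max_col:
--             diagonal.append((i, j))
--             i += 1
--             j += 1
--         if diagonal:
--             diagonals.append(diagonal)
--
--     # Diagonals starting from top edge
--     for d in range(1, max_row - min_row + 1):
--         diagonal = []
--         i = min_row + d
--         j = min_col
--         while i <= max_row and j <= max_col:
--             diagonal.append((i, j))
--             i += 1
--             j += 1
--         if diagonal:
--             diagonals.append(diagonal)
--
--     # Anti-diagonals
--     # Diagonals starting from right edge
--     for d in range(max_col - min_col + 1):
--         diagonal = []
--         i = min_row
--         j = max_col - d
--         while i <= max_row and j >= min_col: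
--             diagonal.append((i, j))
--             i += 1
--             j -= 1
--         if diagonal:
--             diagonals.append(diagonal)
--
--     # Diagonals starting from top edge
--     for d in range(1, max_row - min_row + 1):
--         diagonal = []
--         i = min_row + d
--         j = max_col
--         while i <= max_row and j >= min_col:
--             diagonal.append((i, j))
--             i += 1
--             j -= 1
--         if diagonal:
--             diagonals.append(diagonal)
--
--     # Checks all diagonals for having both positions
--     for diagonal in diagonals:
--         if position in diagonal and new_position in diagonal:
--             index1 = diagonal.index(position)
--             index2 = diagonal.index(new_position)
--             start, end = min(index1, index2), max(index1, index2)
--             return diagonal[start + 1:end]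
--
--     return []
-- ===== SOURCE B (Python) =====
-- def get_intermediate_locations(position, new_position):
--     """Directly steps from position toward new_position instead of enumerating
--     all diagonals of the bounding box."""
--     r0, c0 = position
--     r1, c1 = new_position
--     dr, dc = r1 - r0, c1 - c0
--     if dc == 0:
--         s = 1 if dr > 0 else -1
--         return [(r, c0) for r in range(r0 + s, r1, s)]
--     if dr == 0:
--         s = 1 if dc > 0 else -1
--         return [(r0, c) for c in range(c0 + s, c1, s)]
--     if abs(dr) != abs(dc):
--         return []
--     # diagonal: A returns intermediates in increasing-row order
--     if r0 > r1:
--         r0, c0, r1, c1 = r1, c1, r0, c0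
--     sc = 1 if c1 > c0 else -1
--     return [(r0 + k, c0 + k * sc) for k in range(1, r1 - r0)]
-- ===== Notes on version B (the rewrite author's own statement) =====
-- stated objective: faster
-- what changed: B checks |dr|==|dc| and steps directly along the vertical/horizontal/diagonal line in O(path length), instead of materialising every main and anti diagonal of the bounding box and scanning them for one containing both endpoints.
import Mathlib
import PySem

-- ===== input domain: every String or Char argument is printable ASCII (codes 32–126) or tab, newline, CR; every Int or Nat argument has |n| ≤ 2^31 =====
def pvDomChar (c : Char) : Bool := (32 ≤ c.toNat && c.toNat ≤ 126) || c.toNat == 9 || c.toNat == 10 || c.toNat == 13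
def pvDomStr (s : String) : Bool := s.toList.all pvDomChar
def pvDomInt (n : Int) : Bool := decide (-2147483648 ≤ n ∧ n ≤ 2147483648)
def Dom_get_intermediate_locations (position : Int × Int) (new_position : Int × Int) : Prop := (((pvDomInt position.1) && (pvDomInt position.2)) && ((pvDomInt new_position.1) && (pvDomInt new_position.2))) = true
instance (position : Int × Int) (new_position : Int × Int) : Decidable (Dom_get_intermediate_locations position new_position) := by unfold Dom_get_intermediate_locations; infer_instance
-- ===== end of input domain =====

-- B replaces A's enumeration of every diagonal of the bounding box with a direct
-- O(path-length) step along the aligned line (objective: faster, asymptotically).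

-- ===== PORT A =====

-- the inner 'while i <= max_row and j <= max_col' loop of A's main-diagonal builder
def pvWhileMain (max_row max_col i j : Int) : List (Int × Int) :=
  if h : i ≤ max_row ∧ j ≤ max_col then (i, j) :: pvWhileMain max_row max_col (i + 1) (j + 1)
  else []
  termination_by (max_row + 1 - i).toNat
  decreasing_by omega

def pvWhileAnti (max_row min_col i j : Int) : List (Int × Int) :=
  if h : i ≤ max_row ∧ min_col ≤ j then (i, j) :: pvWhileAnti max_row min_col (i + 1) (j - 1)
  else []
  termination_by (max_row + 1 - i).toNat
  decreasing_by omega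

def pvSearch (pos newp : Int × Int) : List (List (Int × Int)) → List (Int × Int)
  | [] => []
  | diag :: rest =>
    if pos ∈ diag ∧ newp ∈ diag then
      let index1 := (PySem.List.index? diag pos).getD 0
      let index2 := (PySem.List.index? diag newp).getD 0
      PySem.List.slice diag (some ((min index1 index2 : ℕ) + 1)) (some ((max index1 index2 : ℕ) : Int))
    else pvSearch pos newp rest


def get_intermediate_locations (position : Int × Int) (new_position : Int × Int) : List (Int × Int) :=
  if position.2 = new_position.2 then
    let step : Int := if new_position.1 > position.1 then 1 else -1
    (PySem.List.pyRange (position.1 + step) new_position.1 step).foldl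
      (fun acc x => acc ++ [(x, position.2)]) []
  else if position.1 = new_position.1 then
    let step : Int := if new_position.2 > position.2 then 1 else -1
    (PySem.List.pyRange (position.2 + step) new_position.2 step).foldl
      (fun acc y => acc ++ [(position.1, y)]) []
  else
    let min_row := min position.1 new_position.1
    let max_row := max position.1 new_position.1
    let min_col := min position.2 new_position.2
    let max_col := max position.2 new_position.2
    let diagonals : List (List (Int × Int)) :=
      (PySem.List.pyRange 0 (max_col - min_col + 1) 1).foldl
        (fun acc d => let diag := pvWhileMain max_row max_col min_row (min_col + d)
                      if diag ≠ [] then acc ++ [diag] else acc) []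
    let diagonals :=
      (PySem.List.pyRange 1 (max_row - min_row + 1) 1).foldl
        (fun acc d => let diag := pvWhileMain max_row max_col (min_row + d) min_col
                      if diag ≠ [] then acc ++ [diag] else acc) diagonals
    let diagonals :=
      (PySem.List.pyRange 0 (max_col - min_col + 1) 1).foldl
        (fun acc d => let diag := pvWhileAnti max_row min_col min_row (max_col - d)
                      if diag ≠ [] then acc ++ [diag] else acc) diagonals
    let diagonals :=
      (PySem.List.pyRange 1 (max_row - min_row + 1) 1).foldl
        (fun acc d => let diag := pvWhileAnti max_row min_col (min_row + d) max_col
                      if diag ≠ [] then acc ++ [diag] else acc) diagonals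
    pvSearch position new_position diagonals

def get_intermediate_locations_alt (position : Int × Int) (new_position : Int × Int) : List (Int × Int) :=
  let r0 := position.1; let c0 := position.2
  let r1 := new_position.1; let c1 := new_position.2
  let dr := r1 - r0; let dc := c1 - c0
  if dc = 0 then
    let s : Int := if dr > 0 then 1 else -1
    (PySem.List.pyRange (r0 + s) r1 s).map (fun r => (r, c0))
  else if dr = 0 then
    let s : Int := if dc > 0 then 1 else -1
    (PySem.List.pyRange (c0 + s) c1 s).map (fun c => (r0, c))
  else if dr.natAbs ≠ dc.natAbs then []
  else
    let (a0, b0, a1, b1) := if r0 > r1 then (r1, c1, r0, c0) else (r0, c0, r1, c1)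
    let sc : Int := if b1 > b0 then 1 else -1
    (PySem.List.pyRange 1 (a1 - a0) 1).map (fun k => (a0 + k, b0 + k * sc))


-- ===== PRECONDITION & SPEC =====
def Spec_get_intermediate_locations (position : Int × Int) (new_position : Int × Int) (out : List (Int × Int)) : Prop := out = get_intermediate_locations_alt position new_position
instance (position : Int × Int) (new_position : Int × Int) (out : List (Int × Int)) : Decidable (Spec_get_intermediate_locations position new_position out) := by unfold Spec_get_intermediate_locations; infer_instance

-- ===== CLAIM (what is proved, stated in full; the proofs are below) =====
def Claim_equal_get_intermediate_locations : Prop := ∀ (position : Int × Int) (new_position : Int × Int), Dom_get_intermediate_locations position new_position → Spec_get_intermediate_locations position new_position (get_intermediate_locations position new_position)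

-- ===== LEMMAS AND PROOFS =====

theorem pvWhileMain_closed (max_row max_col i j : Int) :
    pvWhileMain max_row max_col i j =
      (List.range ((min (max_row - i) (max_col - j) + 1).toNat)).map
        (fun (k : ℕ) => (i + (k : Int), j + (k : Int))) := by
  fun_induction pvWhileMain with
  | case1 i j h ih =>
    have hn : (min (max_row - i) (max_col - j) + 1).toNat
        = (min (max_row - (i+1)) (max_col - (j+1)) + 1).toNat + 1 := by omega
    rw [hn, List.range_succ_eq_map, List.map_cons, ih]
    simp only [List.map_map, Nat.cast_zero, add_zero]
    congr 1
    apply List.map_congr_left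
    intro k _
    simp only [Function.comp, Prod.mk.injEq]
    push_cast
    omega
  | case2 i j h =>
    have hn : (min (max_row - i) (max_col - j) + 1).toNat = 0 := by omega
    rw [hn]; simp

theorem pvWhileAnti_closed (max_row min_col i j : Int) :
    pvWhileAnti max_row min_col i j =
      (List.range ((min (max_row - i) (j - min_col) + 1).toNat)).map
        (fun (k : ℕ) => (i + (k : Int), j - (k : Int))) := by
  fun_induction pvWhileAnti with
  | case1 i j h ih =>
    have hn : (min (max_row - i) (j - min_col) + 1).toNat
        = (min (max_row - (i+1)) ((j-1) - min_col) + 1).toNat + 1 := by omega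
    rw [hn, List.range_succ_eq_map, List.map_cons, ih]
    simp only [List.map_map, Nat.cast_zero, add_zero, sub_zero]
    congr 1
    apply List.map_congr_left
    intro k _
    simp only [Function.comp, Prod.mk.injEq]
    push_cast
    omega
  | case2 i j h =>
    have hn : (min (max_row - i) (j - min_col) + 1).toNat = 0 := by omega
    rw [hn]; simp

theorem mem_pvWhileMain_diff {a b max_row max_col i j : Int}
    (h : (a, b) ∈ pvWhileMain max_row max_col i j) : a - b = i - j := by
  rw [pvWhileMain_closed] at h
  simp only [List.mem_map, List.mem_range, Prod.mk.injEq] at h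
  obtain ⟨k, _, h1, h2⟩ := h
  omega

theorem mem_pvWhileAnti_sum {a b max_row min_col i j : Int}
    (h : (a, b) ∈ pvWhileAnti max_row min_col i j) : a + b = i + j := by
  rw [pvWhileAnti_closed] at h
  simp only [List.mem_map, List.mem_range, Prod.mk.injEq] at h
  obtain ⟨k, _, h1, h2⟩ := h
  omega

theorem pvWhileMain_ne_nil {max_row max_col i j : Int} (h1 : i ≤ max_row) (h2 : j ≤ max_col) :
    pvWhileMain max_row max_col i j ≠ [] := by
  rw [pvWhileMain]
  simp [h1, h2]

theorem pvWhileAnti_ne_nil {max_row min_col i j : Int} (h1 : i ≤ max_row) (h2 : min_col ≤ j) :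
    pvWhileAnti max_row min_col i j ≠ [] := by
  rw [pvWhileAnti]
  simp [h1, h2]

theorem pvSearch_append_of_none {pos newp : Int × Int} {l1 l2 : List (List (Int × Int))}
    (h : ∀ d ∈ l1, ¬(pos ∈ d ∧ newp ∈ d)) :
    pvSearch pos newp (l1 ++ l2) = pvSearch pos newp l2 := by
  induction l1 with
  | nil => simp
  | cons d t ih =>
    rw [List.cons_append, pvSearch, if_neg (h d (by simp))]
    exact ih (fun d' hd' => h d' (by simp [hd']))

theorem pvSearch_head (f : ℕ → Int × Int) (e : ℕ) (he : 0 < e)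
    (hmono : ∀ a b : ℕ, a < b → b ≤ e → (f a).1 < (f b).1)
    (p q : Int × Int) (hpq : (p = f 0 ∧ q = f e) ∨ (p = f e ∧ q = f 0))
    (rest : List (List (Int × Int))) :
    pvSearch p q (((List.range (e + 1)).map f) :: rest) =
      (List.range (e - 1)).map (fun k => f (k + 1)) := by
  have hmem0 : f 0 ∈ (List.range (e+1)).map f := List.mem_map_of_mem (by simp)
  have hmeme : f e ∈ (List.range (e+1)).map f := List.mem_map_of_mem (by simp)
  have hp : p ∈ (List.range (e+1)).map f := by
    rcases hpq with ⟨h1,_⟩|⟨h1,_⟩ <;> rw [h1] <;> assumption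
  have hq : q ∈ (List.range (e+1)).map f := by
    rcases hpq with ⟨_,h1⟩|⟨_,h1⟩ <;> rw [h1] <;> assumption
  have hne : f e ∉ (List.range e).map f := by
    intro hmem
    obtain ⟨k, hk, hfk⟩ := List.mem_map.mp hmem
    have := hmono k e (List.mem_range.mp hk) le_rfl
    rw [hfk] at this
    exact lt_irrefl _ this
  have hidx0 : PySem.List.index? ((List.range (e+1)).map f) (f 0) = some 0 := by
    rw [List.range_succ_eq_map, List.map_cons]
    exact PySem.List.index?_cons_self _ _
  have hidxe : PySem.List.index? ((List.range (e+1)).map f) (f e) = some e := by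
    rw [List.range_succ, List.map_append, List.map_singleton]
    have := PySem.List.index?_append_singleton_self ((List.range e).map f) (f e) hne
    simpa using this
  have hslice : PySem.List.slice ((List.range (e+1)).map f) (some ((0:ℕ) + 1)) (some ((e:ℕ) : Int))
      = (List.range (e - 1)).map (fun k => f (k + 1)) := by
    have h1 : ((0:ℕ) : Int) + 1 = ((1:ℕ) : Int) := by norm_num
    rw [h1, PySem.List.slice_natCast]
    rw [List.range_succ_eq_map, List.map_cons, List.drop_one, List.tail_cons]
    rw [List.map_map, ← List.map_take, List.take_range, Nat.min_eq_left (by omega)]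
    exact List.map_congr_left (fun k _ => rfl)
  rw [pvSearch]
  rw [if_pos ⟨hp, hq⟩]
  rcases hpq with ⟨h1,h2⟩|⟨h1,h2⟩ <;> subst h1 <;> subst h2 <;>
    simp only [hidx0, hidxe, Option.getD_some] <;>
    [skip; rw [min_comm, max_comm]] <;>
    · rw [show min 0 e = 0 by omega, show max 0 e = e by omega]
      exact hslice

theorem foldl_diag_all (g : Int → List (Int × Int)) (l : List Int) (acc : List (List (Int × Int)))
    (h : ∀ d ∈ l, g d ≠ []) :
    l.foldl (fun acc d => if g d ≠ [] then acc ++ [g d] else acc) acc = acc ++ l.map g := by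
  induction l generalizing acc with
  | nil => simp
  | cons x t ih =>
    rw [List.foldl_cons, if_pos (h x (by simp)), List.map_cons]
    rw [ih _ (fun d hd => h d (by simp [hd]))]
    simp

theorem pv_main : ∀ (position : Int × Int) (new_position : Int × Int),
    get_intermediate_locations position new_position = get_intermediate_locations_alt position new_position := by
  rintro ⟨r0, c0⟩ ⟨r1, c1⟩
  simp only [get_intermediate_locations, get_intermediate_locations_alt]
  by_cases hV : c0 = c1
  · rw [if_pos hV, if_pos (show c1 - c0 = 0 by omega)]
    rw [show ((if r1 - r0 > 0 then (1:ℤ) else -1)) = (if r1 > r0 then 1 else -1) from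
      if_congr (by omega) rfl rfl]
    rw [PySem.List.foldl_append_singleton_eq_map, List.nil_append]
  · rw [if_neg hV, if_neg (show ¬(c1 - c0 = 0) by omega)]
    by_cases hH : r0 = r1
    · rw [if_pos hH, if_pos (show r1 - r0 = 0 by omega)]
      rw [show ((if c1 - c0 > 0 then (1:ℤ) else -1)) = (if c1 > c0 then 1 else -1) from
        if_congr (by omega) rfl rfl]
      rw [PySem.List.foldl_append_singleton_eq_map, List.nil_append]
    · rw [if_neg hH, if_neg (show ¬(r1 - r0 = 0) by omega)]
      rw [foldl_diag_all (fun d => pvWhileMain (max r0 r1) (max c0 c1) (min r0 r1) (min c0 c1 + d)) _ _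
        (fun d hd => by
          rw [PySem.List.mem_pyRange_one] at hd
          exact pvWhileMain_ne_nil (by omega) (by omega))]
      rw [foldl_diag_all (fun d => pvWhileMain (max r0 r1) (max c0 c1) (min r0 r1 + d) (min c0 c1)) _ _
        (fun d hd => by
          rw [PySem.List.mem_pyRange_one] at hd
          exact pvWhileMain_ne_nil (by omega) (by omega))]
      rw [foldl_diag_all (fun d => pvWhileAnti (max r0 r1) (min c0 c1) (min r0 r1) (max c0 c1 - d)) _ _
        (fun d hd => by
          rw [PySem.List.mem_pyRange_one] at hd
          exact pvWhileAnti_ne_nil (by omega) (by omega))]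
      rw [foldl_diag_all (fun d => pvWhileAnti (max r0 r1) (min c0 c1) (min r0 r1 + d) (max c0 c1)) _ _
        (fun d hd => by
          rw [PySem.List.mem_pyRange_one] at hd
          exact pvWhileAnti_ne_nil (by omega) (by omega))]
      rw [List.nil_append]
      by_cases hX : r1 - r0 = c1 - c0
      · -- same-sign diagonal: the very first main diagonal contains both endpoints
        rw [if_neg (show ¬((r1 - r0).natAbs ≠ (c1 - c0).natAbs) by omega)]
        rw [PySem.List.pyRange_one_cons (show (0:ℤ) < max c0 c1 - min c0 c1 + 1 by omega)]
        rw [List.map_cons]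
        simp only [List.cons_append]
        rw [pvWhileMain_closed]
        rw [show (min (max r0 r1 - min r0 r1) (max c0 c1 - (min c0 c1 + 0)) + 1).toNat
            = (r1 - r0).natAbs + 1 by omega]
        by_cases hgt : r0 > r1
        · rw [pvSearch_head (fun k : ℕ => (min r0 r1 + (k:ℤ), min c0 c1 + 0 + (k:ℤ))) ((r1 - r0).natAbs) (by omega)
            (fun a b hab hbe => by simp only []; omega)
            _ _ (Or.inr ⟨by simp only [Prod.mk.injEq]; omega,
                         by simp only [Prod.mk.injEq]; omega⟩)]
          rw [if_pos hgt]
          dsimp only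
          rw [if_pos (show c0 > c1 by omega)]
          rw [PySem.List.pyRange_one, List.map_map]
          rw [show (r0 - r1 - 1).toNat = (r1 - r0).natAbs - 1 by omega]
          apply List.map_congr_left
          intro k hk
          simp only [Function.comp_apply, Prod.mk.injEq]
          push_cast
          omega
        · rw [pvSearch_head (fun k : ℕ => (min r0 r1 + (k:ℤ), min c0 c1 + 0 + (k:ℤ))) ((r1 - r0).natAbs) (by omega)
            (fun a b hab hbe => by simp only []; omega)
            _ _ (Or.inl ⟨by simp only [Prod.mk.injEq]; omega,
                         by simp only [Prod.mk.injEq]; omega⟩)]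
          rw [if_neg hgt]
          dsimp only
          rw [if_pos (show c1 > c0 by omega)]
          rw [PySem.List.pyRange_one, List.map_map]
          rw [show (r1 - r0 - 1).toNat = (r1 - r0).natAbs - 1 by omega]
          apply List.map_congr_left
          intro k hk
          simp only [Function.comp_apply, Prod.mk.injEq]
          push_cast
          omega
      · by_cases hY : r1 - r0 = -(c1 - c0)
        · -- opposite-sign diagonal: no main diagonal contains both; first anti-diagonal does
          rw [if_neg (show ¬((r1 - r0).natAbs ≠ (c1 - c0).natAbs) by omega)]
          rw [List.append_assoc (_ ++ _)]
          rw [pvSearch_append_of_none (by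
            intro d hd
            rcases List.mem_append.mp hd with h | h <;>
            · obtain ⟨x, hx, rfl⟩ := List.mem_map.mp h
              rintro ⟨hpm, hqm⟩
              have h1 := mem_pvWhileMain_diff hpm
              have h2 := mem_pvWhileMain_diff hqm
              omega)]
          rw [PySem.List.pyRange_one_cons (show (0:ℤ) < max c0 c1 - min c0 c1 + 1 by omega)]
          rw [List.map_cons]
          simp only [List.cons_append]
          rw [pvWhileAnti_closed]
          rw [show (min (max r0 r1 - min r0 r1) (max c0 c1 - 0 - min c0 c1) + 1).toNat
              = (r1 - r0).natAbs + 1 by omega]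
          by_cases hgt : r0 > r1
          · rw [pvSearch_head (fun k : ℕ => (min r0 r1 + (k:ℤ), max c0 c1 - 0 - (k:ℤ))) ((r1 - r0).natAbs) (by omega)
              (fun a b hab hbe => by simp only []; omega)
              _ _ (Or.inr ⟨by simp only [Prod.mk.injEq]; omega,
                           by simp only [Prod.mk.injEq]; omega⟩)]
            rw [if_pos hgt]
            dsimp only
            rw [if_neg (show ¬(c0 > c1) by omega)]
            rw [PySem.List.pyRange_one, List.map_map]
            rw [show (r0 - r1 - 1).toNat = (r1 - r0).natAbs - 1 by omega]
            apply List.map_congr_left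
            intro k hk
            simp only [Function.comp_apply, Prod.mk.injEq, mul_neg_one]
            push_cast
            omega
          · rw [pvSearch_head (fun k : ℕ => (min r0 r1 + (k:ℤ), max c0 c1 - 0 - (k:ℤ))) ((r1 - r0).natAbs) (by omega)
              (fun a b hab hbe => by simp only []; omega)
              _ _ (Or.inl ⟨by simp only [Prod.mk.injEq]; omega,
                           by simp only [Prod.mk.injEq]; omega⟩)]
            rw [if_neg hgt]
            dsimp only
            rw [if_neg (show ¬(c1 > c0) by omega)]
            rw [PySem.List.pyRange_one, List.map_map]
            rw [show (r1 - r0 - 1).toNat = (r1 - r0).natAbs - 1 by omega]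
            apply List.map_congr_left
            intro k hk
            simp only [Function.comp_apply, Prod.mk.injEq, mul_neg_one]
            push_cast
            omega
        · -- not diagonal at all: every diagonal misses one endpoint
          rw [if_pos (show (r1 - r0).natAbs ≠ (c1 - c0).natAbs by omega)]
          rw [← List.append_nil (_ ++ _ ++ _ ++ _ : List (List (ℤ × ℤ)))]
          rw [pvSearch_append_of_none (by
            intro d hd
            simp only [List.mem_append] at hd
            rcases hd with ((h | h) | h) | h
            · obtain ⟨x, hx, rfl⟩ := List.mem_map.mp h
              rintro ⟨hpm, hqm⟩
              have h1 := mem_pvWhileMain_diff hpm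
              have h2 := mem_pvWhileMain_diff hqm
              omega
            · obtain ⟨x, hx, rfl⟩ := List.mem_map.mp h
              rintro ⟨hpm, hqm⟩
              have h1 := mem_pvWhileMain_diff hpm
              have h2 := mem_pvWhileMain_diff hqm
              omega
            · obtain ⟨x, hx, rfl⟩ := List.mem_map.mp h
              rintro ⟨hpm, hqm⟩
              have h1 := mem_pvWhileAnti_sum hpm
              have h2 := mem_pvWhileAnti_sum hqm
              omega
            · obtain ⟨x, hx, rfl⟩ := List.mem_map.mp h
              rintro ⟨hpm, hqm⟩
              have h1 := mem_pvWhileAnti_sum hpm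
              have h2 := mem_pvWhileAnti_sum hqm
              omega)]
          rfl

-- ===== VERDICT (by name: the statement is the Claim_ definition above) =====
theorem get_intermediate_locations_spec : Claim_equal_get_intermediate_locations := by
  intro position new_position _
  unfold Spec_get_intermediate_locations
  exact pv_main position new_position
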